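-- pv_equiv track=rewrite | github.com/kmartinez/picogps | testfiles/satrepeats.py | getnextalarm
-- ===== SOURCE A (Python) =====
-- schedule = [0,3,6,9,12,13,14,15,16,17,18]
--
-- def getnextalarm(hh):
-- 	nexttime = None
--
-- 	if(hh in schedule):
-- 		position = schedule.index(hh)
-- 		nextpos = position+1
-- 		if(nextpos>(len(schedule)-1)):
-- 			nextpos = 0
-- 		nexttime = schedule[nextpos]
-- 	else:
-- 		for i in schedule:
-- 			if(i>hh):
-- 				nexttime = i
-- 				break
-- 		if(nexttime==None):
-- 			nexttime = 0
-- 	return nexttime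
-- ===== SOURCE B (Python) =====
-- import bisect
--
-- schedule = [0, 3, 6, 9, 12, 13, 14, 15, 16, 17, 18]
--
-- def getnextalarm(hh):
--     i = bisect.bisect_right(schedule, hh)
--     return 0 if i == len(schedule) else schedule[i]
-- ===== Notes on version B (the rewrite author's own statement) =====
-- stated objective: idiomatic
-- what changed: Replaced A's membership-test/index branch plus linear scan with a single bisect_right binary search into the sorted schedule, taking the first entry when the search runs past the end.
import Mathlib
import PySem

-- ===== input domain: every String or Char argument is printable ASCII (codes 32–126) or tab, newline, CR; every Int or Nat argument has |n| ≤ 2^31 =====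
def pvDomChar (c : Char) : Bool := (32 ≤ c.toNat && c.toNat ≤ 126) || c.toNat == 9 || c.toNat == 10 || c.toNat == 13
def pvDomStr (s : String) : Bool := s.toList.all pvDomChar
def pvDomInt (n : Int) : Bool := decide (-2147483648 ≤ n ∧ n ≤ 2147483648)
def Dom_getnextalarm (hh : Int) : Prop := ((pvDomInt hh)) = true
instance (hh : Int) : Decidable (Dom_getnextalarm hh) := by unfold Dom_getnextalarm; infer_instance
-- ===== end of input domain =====

-- B replaces A's membership/index branch plus linear scan with a single bisect_right binary search (idiomatic).

def pvSchedule : List Int := [0, 3, 6, 9, 12, 13, 14, 15, 16, 17, 18]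

-- ===== PORT A =====
-- literal transliteration: membership test, index+1 with wrap, else linear scan (with break) for first i > hh, defaulting to 0
def getnextalarm (hh : Int) : Option Int :=
  if pvSchedule.contains hh then
    match PySem.List.index? pvSchedule hh with
    | none => none   -- unreachable: membership just held
    | some position =>
      let nextpos : Int := position + 1
      let nextpos : Int := if nextpos > (pvSchedule.length : Int) - 1 then 0 else nextpos
      PySem.List.pyGet? pvSchedule nextpos
  else
    let nexttime : Option Int :=
      pvSchedule.foldl
        (fun acc i => match acc with
          | some _ => acc                      -- loop already broke
          | none => if i > hh then some i else none) none
    some (match nexttime with | none => 0 | some v => v)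

-- ===== PORT B =====
def getnextalarm_alt (hh : Int) : Option Int :=
  let i := PySem.List.bisectRight pvSchedule hh
  if i = pvSchedule.length then some 0 else PySem.List.pyGet? pvSchedule (i : Int)

-- ===== PRECONDITION & SPEC =====
def Spec_getnextalarm (hh : Int) (out : Option Int) : Prop := out = getnextalarm_alt hh
instance (hh : Int) (out : Option Int) : Decidable (Spec_getnextalarm hh out) := by unfold Spec_getnextalarm; infer_instance

-- ===== CLAIM (what is proved, stated in full; the proofs are below) =====
def Claim_equal_getnextalarm : Prop := ∀ (hh : Int), Dom_getnextalarm hh → Spec_getnextalarm hh (getnextalarm hh)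

-- ===== LEMMAS AND PROOFS =====

theorem pvSorted : List.Pairwise (fun x1 x2 => x1 ≤ x2) pvSchedule := by decide

theorem getnextalarm_eq_low (hh : Int) (h : hh < 0) : getnextalarm hh = some 0 := by
  simp [getnextalarm, pvSchedule, h, show hh ≠ 0 by omega, show hh ≠ 3 by omega, show hh ≠ 6 by omega,
    show hh ≠ 9 by omega, show hh ≠ 12 by omega, show hh ≠ 13 by omega, show hh ≠ 14 by omega,
    show hh ≠ 15 by omega, show hh ≠ 16 by omega, show hh ≠ 17 by omega, show hh ≠ 18 by omega]

theorem getnextalarm_eq_high (hh : Int) (h : 18 < hh) : getnextalarm hh = some 0 := by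
  simp [getnextalarm, pvSchedule, show ¬hh < 0 by omega, show ¬hh < 3 by omega, show ¬hh < 6 by omega,
    show ¬hh < 9 by omega, show ¬hh < 12 by omega, show ¬hh < 13 by omega, show ¬hh < 14 by omega,
    show ¬hh < 15 by omega, show ¬hh < 16 by omega, show ¬hh < 17 by omega, show ¬hh < 18 by omega,
    show hh ≠ 0 by omega, show hh ≠ 3 by omega, show hh ≠ 6 by omega,
    show hh ≠ 9 by omega, show hh ≠ 12 by omega, show hh ≠ 13 by omega, show hh ≠ 14 by omega,
    show hh ≠ 15 by omega, show hh ≠ 16 by omega, show hh ≠ 17 by omega, show hh ≠ 18 by omega]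

theorem getnextalarm_alt_low (hh : Int) (h : hh < 0) : getnextalarm_alt hh = some 0 := by
  obtain ⟨hle, hlt, hge⟩ := PySem.List.bisectRight_spec pvSchedule hh pvSorted
  have h0 : PySem.List.bisectRight pvSchedule hh = 0 := by
    by_contra hne
    have := hlt 0 (by decide) (by omega)
    simp [pvSchedule] at this
    omega
  have h0' : PySem.List.bisectRight [0, 3, 6, 9, 12, 13, 14, 15, 16, 17, 18] hh = 0 := by
    simpa [pvSchedule] using h0
  simp [getnextalarm_alt, pvSchedule, h0', PySem.List.pyGet?, PySem.List.pyIdx?]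

theorem getnextalarm_alt_high (hh : Int) (h : 18 < hh) : getnextalarm_alt hh = some 0 := by
  obtain ⟨hle, hlt, hge⟩ := PySem.List.bisectRight_spec pvSchedule hh pvSorted
  have h0 : PySem.List.bisectRight pvSchedule hh = 11 := by
    by_contra hne
    have hlen : pvSchedule.length = 11 := by decide
    have := hge 10 (by decide) (by omega)
    simp [pvSchedule] at this
    omega
  have h0' : PySem.List.bisectRight [0, 3, 6, 9, 12, 13, 14, 15, 16, 17, 18] hh = 11 := by
    simpa [pvSchedule] using h0
  simp [getnextalarm_alt, pvSchedule, h0']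

-- ===== VERDICT (by name: the statement is the Claim_ definition above) =====
theorem getnextalarm_spec : Claim_equal_getnextalarm := by
  intro hh _
  unfold Spec_getnextalarm
  by_cases hlo : hh < 0
  · rw [getnextalarm_eq_low hh hlo, getnextalarm_alt_low hh hlo]
  · by_cases hhi : 18 < hh
    · rw [getnextalarm_eq_high hh hhi, getnextalarm_alt_high hh hhi]
    · interval_cases hh <;> decide
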